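-- pv_equiv track=rewrite | github.com/thenvoi/thenvoi-sdk-python | src/thenvoi/adapters/letta/memory.py | _parse_room_contexts
-- ===== SOURCE A (Python) =====
-- def _parse_room_contexts(value: str) -> dict[str, str]:
--     """Parse room_contexts block into dict."""
--     if not value or value.startswith("No room contexts"):
--         return {}
--
--     contexts: dict[str, str] = {}
--     current_room: str | None = None
--     current_content: list[str] = []
--
--     for line in value.split("\n"):
--         if line.startswith("## Room:"):
--             if current_room:
--                 contexts[current_room] = "\n".join(current_content).strip()
--             current_room = line.replace("## Room:", "").strip()
--             current_content = []
--         elif current_room: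
--             current_content.append(line)
--
--     if current_room:
--         contexts[current_room] = "\n".join(current_content).strip()
--
--     return contexts
-- ===== SOURCE B (Python) =====
-- def _parse_room_contexts(value: str) -> dict[str, str]:
--     """Parse room_contexts block into dict."""
--     if not value or value.startswith("No room contexts"):
--         return {}
--
--     lines = value.split("\n")
--     n = len(lines)
--     contexts: dict[str, str] = {}
--
--     i = 0
--     # skip everything before the first room header
--     while i < n and not lines[i].startswith("## Room:"):
--         i += 1
--
--     # block by block: header line, then its body up to the next header
--     while i < n:
--         name = lines[i].replace("## Room:", "").strip()
--         i += 1
--         body = []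
--         while i < n and not lines[i].startswith("## Room:"):
--             body.append(lines[i])
--             i += 1
--         if name:
--             contexts[name] = "\n".join(body).strip()
--
--     return contexts
-- ===== Notes on version B (the rewrite author's own statement) =====
-- stated objective: alternative
-- what changed: Replaces A's single-pass state machine (current_room/current_content carried across the loop with a post-loop flush) by a block-structured scan: skip the preamble, then consume one header plus its body per outer step, inserting immediately with no trailing flush.
import Mathlib
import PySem

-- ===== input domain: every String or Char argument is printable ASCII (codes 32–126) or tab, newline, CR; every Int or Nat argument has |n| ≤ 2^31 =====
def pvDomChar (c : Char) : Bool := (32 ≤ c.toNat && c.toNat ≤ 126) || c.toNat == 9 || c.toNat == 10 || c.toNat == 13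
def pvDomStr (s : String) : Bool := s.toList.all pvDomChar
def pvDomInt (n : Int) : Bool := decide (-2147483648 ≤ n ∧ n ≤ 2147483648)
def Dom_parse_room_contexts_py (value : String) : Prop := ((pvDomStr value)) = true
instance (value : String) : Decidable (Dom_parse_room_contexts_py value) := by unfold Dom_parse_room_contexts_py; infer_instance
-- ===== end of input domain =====

-- B replaces A's carried-state loop with a block-structured scan (skip preamble, then one header+body per step); same cost, plainer shape.

-- shared helper: line.startswith("## Room:")
def pvIsHeader (line : String) : Bool := PySem.Str.startswith line "## Room:"

-- ===== PORT A =====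
-- loop state: (contexts, current_room, current_content)
def pvStepA (st : PySem.Dict String String × Option String × List String) (line : String) :
    PySem.Dict String String × Option String × List String :=
  let (contexts, current_room, current_content) := st
  if pvIsHeader line then
    let contexts :=
      match current_room with
      | some r =>
          if r ≠ "" then
            contexts.insert r (PySem.Str.strip (PySem.Str.join "\n" current_content))
          else contexts
      | none => contexts
    (contexts, some (PySem.Str.strip (PySem.Str.replace line "## Room:" "")), [])
  else
    match current_room with
    | some r => if r ≠ "" then (contexts, current_room, current_content ++ [line]) else st
    | none => st

def parse_room_contexts_py (value : String) : List (String × String) :=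
  if value = "" || PySem.Str.startswith value "No room contexts" then []
  else
    let st := ((PySem.Str.split? value "\n").getD []).foldl pvStepA (PySem.Dict.empty, none, [])
    let (contexts, current_room, current_content) := st
    (match current_room with
     | some r =>
         if r ≠ "" then
           contexts.insert r (PySem.Str.strip (PySem.Str.join "\n" current_content))
         else contexts
     | none => contexts).items

-- ===== PORT B =====
-- the outer while loop of Source B: one header + its body per step
def pvGoB (contexts : PySem.Dict String String) : List String → PySem.Dict String String
  | [] => contexts
  | l :: rest =>
      let name := PySem.Str.strip (PySem.Str.replace l "## Room:" "")
      let body := rest.takeWhile (fun x => !pvIsHeader x)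
      let rest' := rest.dropWhile (fun x => !pvIsHeader x)
      let contexts' :=
        if name ≠ "" then
          contexts.insert name (PySem.Str.strip (PySem.Str.join "\n" body))
        else contexts
      pvGoB contexts' rest'
termination_by ls => ls.length
decreasing_by
  exact Nat.lt_succ_of_le (List.Sublist.length_le (List.dropWhile_sublist _))

def parse_room_contexts_py_alt (value : String) : List (String × String) :=
  if value = "" || PySem.Str.startswith value "No room contexts" then []
  else
    let lines := (PySem.Str.split? value "\n").getD []
    (pvGoB PySem.Dict.empty (lines.dropWhile (fun x => !pvIsHeader x))).items

-- ===== PRECONDITION & SPEC =====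
def Spec_parse_room_contexts_py (value : String) (out : List (String × String)) : Prop := out = parse_room_contexts_py_alt value
instance (value : String) (out : List (String × String)) : Decidable (Spec_parse_room_contexts_py value out) := by unfold Spec_parse_room_contexts_py; infer_instance

-- ===== CLAIM (what is proved, stated in full; the proofs are below) =====
def Claim_equal_parse_room_contexts_py : Prop := ∀ (value : String), Dom_parse_room_contexts_py value → Spec_parse_room_contexts_py value (parse_room_contexts_py value)

-- ===== LEMMAS AND PROOFS =====

theorem pvGoB_nil (d : PySem.Dict String String) : pvGoB d [] = d := by
  simp [pvGoB]

theorem pvGoB_cons (d : PySem.Dict String String) (l : String) (rest : List String) :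
    pvGoB d (l :: rest) =
      pvGoB (if PySem.Str.strip (PySem.Str.replace l "## Room:" "") ≠ "" then
               d.insert (PySem.Str.strip (PySem.Str.replace l "## Room:" ""))
                 (PySem.Str.strip (PySem.Str.join "\n" (rest.takeWhile (fun x => !pvIsHeader x))))
             else d)
        (rest.dropWhile (fun x => !pvIsHeader x)) := by
  rw [pvGoB]

-- finalize A's loop state (the post-loop flush)
def pvFinA (st : PySem.Dict String String × Option String × List String) : PySem.Dict String String :=
  match st with
  | (contexts, current_room, current_content) =>
    match current_room with
    | some r =>
        if r ≠ "" then
          contexts.insert r (PySem.Str.strip (PySem.Str.join "\n" current_content))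
        else contexts
    | none => contexts

def pvFA (st : PySem.Dict String String × Option String × List String) (lines : List String) :
    PySem.Dict String String :=
  pvFinA (lines.foldl pvStepA st)

theorem pvFA_cons (st : PySem.Dict String String × Option String × List String) (l : String)
    (rest : List String) : pvFA st (l :: rest) = pvFA (pvStepA st l) rest := rfl

theorem pvStepA_none_skip (d : PySem.Dict String String) (cc : List String) (l : String)
    (h : pvIsHeader l = false) : pvStepA (d, none, cc) l = (d, none, cc) := by
  simp only [pvStepA, h, Bool.false_eq_true, if_false]

theorem pvStepA_header (d : PySem.Dict String String) (cr : Option String) (cc : List String)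
    (l : String) (h : pvIsHeader l = true) :
    pvStepA (d, cr, cc) l =
      ((match cr with
        | some r => if r ≠ "" then d.insert r (PySem.Str.strip (PySem.Str.join "\n" cc)) else d
        | none => d),
       some (PySem.Str.strip (PySem.Str.replace l "## Room:" "")), []) := by
  simp only [pvStepA, h, if_true]

-- with current_room = none, non-header lines are skipped
theorem pvFA_none_dropWhile (d : PySem.Dict String String) (cc : List String)
    (lines : List String) :
    pvFA (d, none, cc) lines = pvFA (d, none, cc) (lines.dropWhile (fun x => !pvIsHeader x)) := by
  induction lines with
  | nil => rfl
  | cons l rest ih =>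
      by_cases h : pvIsHeader l = true
      · rw [List.dropWhile_cons]
        simp only [h, Bool.not_true, Bool.false_eq_true, if_false]
      · have h' : pvIsHeader l = false := by simpa using h
        rw [List.dropWhile_cons]
        simp only [h', Bool.not_false, if_true]
        rw [pvFA_cons, pvStepA_none_skip d cc l h', ih]

-- current_room = "" behaves exactly like current_room = None
theorem pvFA_empty_eq_none (d : PySem.Dict String String) (cc cc' : List String)
    (lines : List String) :
    pvFA (d, some "", cc) lines = pvFA (d, none, cc') lines := by
  induction lines generalizing cc cc' with
  | nil => rfl
  | cons l rest ih =>
      rw [pvFA_cons, pvFA_cons]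
      by_cases h : pvIsHeader l = true
      · rw [pvStepA_header d (some "") cc l h, pvStepA_header d none cc' l h]
        simp only [ne_eq, not_true_eq_false, if_false]
      · have h' : pvIsHeader l = false := by simpa using h
        rw [pvStepA_none_skip d cc' l h']
        have hs : pvStepA (d, some "", cc) l = (d, some "", cc) := by
          simp only [pvStepA, h', Bool.false_eq_true, if_false, ne_eq, not_true_eq_false]
        rw [hs]
        exact ih cc cc'

theorem pvStepA_room_append (d : PySem.Dict String String) (r : String) (cc : List String)
    (l : String) (h : pvIsHeader l = false) (hr : r ≠ "") :
    pvStepA (d, some r, cc) l = (d, some r, cc ++ [l]) := by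
  simp only [pvStepA, h, Bool.false_eq_true, if_false, ne_eq, hr, not_false_eq_true, if_true]

-- the main invariant, mutually for the none-state and the open-room state, by fuel induction
theorem pvMain (n : ℕ) :
    (∀ lines : List String, lines.length ≤ n → ∀ d cc,
        pvFA (d, none, cc) lines = pvGoB d (lines.dropWhile (fun x => !pvIsHeader x))) ∧
    (∀ lines : List String, lines.length ≤ n → ∀ d (r : String) cc, r ≠ "" →
        pvFA (d, some r, cc) lines =
          pvGoB (d.insert r (PySem.Str.strip (PySem.Str.join "\n"
                  (cc ++ lines.takeWhile (fun x => !pvIsHeader x)))))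
                (lines.dropWhile (fun x => !pvIsHeader x))) := by
  induction n with
  | zero =>
      constructor
      · intro lines hl d cc
        have he : lines = [] := List.eq_nil_of_length_eq_zero (Nat.le_zero.mp hl)
        subst he
        simp [pvFA, pvFinA, pvGoB_nil]
      · intro lines hl d r cc hr
        have he : lines = [] := List.eq_nil_of_length_eq_zero (Nat.le_zero.mp hl)
        subst he
        simp [pvFA, pvFinA, pvGoB_nil, hr]
  | succ n ih =>
      obtain ⟨ihN, ihS⟩ := ih
      constructor
      · intro lines hl d cc
        match lines with
        | [] => simp [pvFA, pvFinA, pvGoB_nil]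
        | l :: rest =>
          by_cases h : pvIsHeader l = true
          · rw [List.dropWhile_cons]
            simp only [h, Bool.not_true, Bool.false_eq_true, if_false]
            rw [pvFA_cons, pvStepA_header d none cc l h, pvGoB_cons]
            set nm := PySem.Str.strip (PySem.Str.replace l "## Room:" "") with hnm
            by_cases hn : nm = ""
            · simp only [hn, ne_eq, not_true_eq_false, if_false]
              rw [pvFA_empty_eq_none d [] [] rest]
              exact ihN rest (Nat.le_of_succ_le_succ hl) d []
            · simp only [ne_eq, hn, not_false_eq_true, if_true]
              have := ihS rest (Nat.le_of_succ_le_succ hl) d nm [] hn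
              simpa using this
          · have h' : pvIsHeader l = false := by simpa using h
            rw [List.dropWhile_cons]
            simp only [h', Bool.not_false, if_true]
            rw [pvFA_cons, pvStepA_none_skip d cc l h', pvFA_none_dropWhile]
            have hlen : (rest.dropWhile (fun x => !pvIsHeader x)).length ≤ n :=
              le_trans (List.Sublist.length_le (List.dropWhile_sublist _))
                (Nat.le_of_succ_le_succ hl)
            rw [ihN _ hlen d cc, List.dropWhile_idempotent]
      · intro lines hl d r cc hr
        match lines with
        | [] => simp [pvFA, pvFinA, pvGoB_nil, hr]
        | l :: rest =>
          by_cases h : pvIsHeader l = true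
          · rw [List.dropWhile_cons, List.takeWhile_cons]
            simp only [h, Bool.not_true, Bool.false_eq_true, if_false]
            rw [pvFA_cons, pvStepA_header d (some r) cc l h]
            simp only [ne_eq, hr, not_false_eq_true, if_true]
            rw [pvGoB_cons]
            set d' := d.insert r (PySem.Str.strip (PySem.Str.join "\n" cc)) with hd'
            set nm := PySem.Str.strip (PySem.Str.replace l "## Room:" "") with hnm
            by_cases hn : nm = ""
            · simp only [hn, ne_eq, not_true_eq_false, if_false]
              rw [pvFA_empty_eq_none d' [] [] rest]
              simpa using ihN rest (Nat.le_of_succ_le_succ hl) d' []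
            · simp only [ne_eq, hn, not_false_eq_true, if_true]
              simpa using ihS rest (Nat.le_of_succ_le_succ hl) d' nm [] hn
          · have h' : pvIsHeader l = false := by simpa using h
            rw [List.dropWhile_cons, List.takeWhile_cons]
            simp only [h', Bool.not_false, if_true]
            rw [pvFA_cons, pvStepA_room_append d r cc l h' hr,
                ihS rest (Nat.le_of_succ_le_succ hl) d r (cc ++ [l]) hr,
                List.append_assoc]
            rfl

-- ===== VERDICT (by name: the statement is the Claim_ definition above) =====
theorem parse_room_contexts_py_spec : Claim_equal_parse_room_contexts_py := by
  intro value _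
  unfold Spec_parse_room_contexts_py parse_room_contexts_py parse_room_contexts_py_alt
  by_cases hv : (value = "" || PySem.Str.startswith value "No room contexts") = true
  · rw [if_pos hv, if_pos hv]
  · rw [if_neg hv, if_neg hv]
    have := (pvMain ((PySem.Str.split? value "\n").getD []).length).1
        ((PySem.Str.split? value "\n").getD []) le_rfl PySem.Dict.empty []
    exact congrArg PySem.Dict.items this
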